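-- pv_equiv track=rewrite | github.com/berkayermis/algoComp21-ITU | Day1/test.py | origin
-- ===== SOURCE A (Python) =====
-- def findMax(lst):
--     maxOrigin = []
--     for i in lst:
--         if len(i) > len(maxOrigin):
--             maxOrigin = i
--     return maxOrigin
--
-- def origin(stations):
--     origins = []
--     for i in range(len(stations) - 1):
--         for j in range(len(stations) - 1, i, -1):
--             if stations[i] == stations[j]:
--                 originStations = stations[i:j + 1]
--                 origins.append(originStations)
--
--     way = findMax(origins)
--     return way
-- ===== SOURCE B (Python) =====
-- def origin(stations):
--     # One pass: record each value's last index, then pick the earliest start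
--     # whose span to the last equal element is strictly longest; slice once per improvement.
--     last = {}
--     for idx, v in enumerate(stations):
--         last[v] = idx
--     best = []
--     for i, v in enumerate(stations):
--         j = last[v]
--         if j > i and j - i + 1 > len(best):
--             best = stations[i:j + 1]
--     return best
-- ===== Notes on version B (the rewrite author's own statement) =====
-- stated objective: faster
-- what changed: A enumerates every (i, j) pair with equal endpoints, materializes each bounded subarray and then scans the collected list for the longest; B builds a last-occurrence index dictionary in one pass and, in a second pass, keeps the first start whose span to the last equal element strictly beats the current best, slicing only on improvement.
import Mathlib
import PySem

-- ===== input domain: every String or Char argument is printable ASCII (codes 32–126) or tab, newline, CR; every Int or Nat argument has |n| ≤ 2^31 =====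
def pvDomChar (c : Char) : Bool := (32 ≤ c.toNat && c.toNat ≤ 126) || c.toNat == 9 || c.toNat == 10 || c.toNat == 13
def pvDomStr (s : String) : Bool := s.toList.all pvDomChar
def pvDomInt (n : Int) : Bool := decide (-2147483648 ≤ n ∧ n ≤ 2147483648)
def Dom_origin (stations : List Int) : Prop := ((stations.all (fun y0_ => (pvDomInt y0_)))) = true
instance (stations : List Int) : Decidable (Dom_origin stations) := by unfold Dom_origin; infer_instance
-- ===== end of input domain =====

-- B replaces A's cubic scan over all equal-endpoint subarray pairs by one pass that
-- records each value's last index and slices the longest strictly-improving span (objective: faster).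

-- ===== PORT A =====
def findMax (lst : List (List Int)) : List Int :=
  lst.foldl (fun maxOrigin i => if i.length > maxOrigin.length then i else maxOrigin) []

def origin (stations : List Int) : List Int :=
  let origins :=
    (PySem.List.pyRange 0 (PySem.List.len stations - 1)).foldl
      (fun origins i =>
        (PySem.List.pyRange (PySem.List.len stations - 1) i (-1)).foldl
          (fun origins j =>
            if PySem.List.pyGet? stations i = PySem.List.pyGet? stations j then
              origins ++ [PySem.List.slice stations (some i) (some (j + 1))]
            else origins)
          origins)
      []
  findMax origins

-- ===== PORT B =====
def lastDict (stations : List Int) : PySem.Dict Int Int :=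
  (PySem.List.enumerate stations).foldl (fun d p => d.insert p.2 p.1) PySem.Dict.empty

def origin_alt (stations : List Int) : List Int :=
  let last := lastDict stations
  (PySem.List.enumerate stations).foldl
    (fun best p =>
      let j := last.getD p.2 0
      if j > p.1 ∧ j - p.1 + 1 > (best.length : Int) then
        PySem.List.slice stations (some p.1) (some (j + 1))
      else best)
    []

-- ===== PRECONDITION & SPEC =====
def Spec_origin (stations : List Int) (out : List Int) : Prop := out = origin_alt stations
instance (stations : List Int) (out : List Int) : Decidable (Spec_origin stations out) := by unfold Spec_origin; infer_instance

-- ===== CLAIM (what is proved, stated in full; the proofs are below) =====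
def Claim_equal_origin : Prop := ∀ (stations : List Int), Dom_origin stations → Spec_origin stations (origin stations)

-- ===== LEMMAS AND PROOFS =====

-- the comparison step of A's findMax
def pickF (a x : List Int) : List Int := if x.length > a.length then x else a

-- index of the LAST occurrence of v in s (meaningful when v ∈ s)
def lastN (s : List Int) (v : Int) : Nat := s.length - 1 - List.idxOf v s.reverse

lemma lastN_lt {s : List Int} {v : Int} (hv : v ∈ s) : lastN s v < s.length := by
  have : List.idxOf v s.reverse < s.reverse.length :=
    List.idxOf_lt_length_of_mem (by simpa using hv)
  have h0 : 0 < s.length := List.length_pos_of_mem hv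
  unfold lastN; omega

lemma getElem_lastN {s : List Int} {v : Int} (hv : v ∈ s) :
    s[lastN s v]'(lastN_lt hv) = v := by
  have hm : List.idxOf v s.reverse < s.reverse.length :=
    List.idxOf_lt_length_of_mem (by simpa using hv)
  have hrev : s.reverse[List.idxOf v s.reverse]'hm = v := List.getElem_idxOf hm
  rw [List.getElem_reverse] at hrev
  simpa [lastN] using hrev

lemma getElem_ne_of_lastN_lt {s : List Int} {v : Int} (hv : v ∈ s)
    {k : Nat} (hk : k < s.length) (h : lastN s v < k) : s[k] ≠ v := by
  have hm : List.idxOf v s.reverse < s.reverse.length :=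
    List.idxOf_lt_length_of_mem (by simpa using hv)
  intro hkv
  have hlt : s.length - 1 - k < List.idxOf v s.reverse := by unfold lastN at h; omega
  have := List.not_of_lt_findIdx (p := (· == v)) (xs := s.reverse)
      (i := s.length - 1 - k) (by simpa [List.idxOf] using hlt)
  rw [List.getElem_reverse] at this
  have hidx : s.length - 1 - (s.length - 1 - k) = k := by omega
  simp only [hidx] at this
  simp [hkv] at this

lemma le_lastN {s : List Int} {v : Int} (hv : v ∈ s)
    {k : Nat} (hk : k < s.length) (hkv : s[k] = v) : k ≤ lastN s v := by
  by_contra h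
  exact getElem_ne_of_lastN_lt hv hk (by omega) hkv

-- the dictionary built by B holds exactly the last-occurrence index
lemma lastDict_getD (s : List Int) (v : Int) (hv : v ∈ s) :
    (lastDict s).getD v 0 = ((lastN s v : Nat) : Int) := by
  induction s using List.reverseRecOn with
  | nil => simp at hv
  | append_singleton t x ih =>
      have hfold : lastDict (t ++ [x]) = (lastDict t).insert x (t.length : Int) := by
        simp [lastDict, PySem.List.enumerate_append, PySem.List.enumerate]
      rw [hfold, PySem.Dict.getD_insert]
      have hrev : (t ++ [x]).reverse = x :: t.reverse := by simp
      by_cases hvx : v = x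
      · subst hvx
        have hl : lastN (t ++ [v]) v = t.length := by
          unfold lastN; rw [hrev, List.idxOf_cons_eq _ rfl]; simp
        simp [hl]
      · have hvt : v ∈ t := by
          rcases List.mem_append.1 hv with h | h
          · exact h
          · simp at h; exact absurd h hvx
        have hm : List.idxOf v t.reverse < t.reverse.length :=
          List.idxOf_lt_length_of_mem (by simpa using hvt)
        have hlast : lastN (t ++ [x]) v = lastN t v := by
          unfold lastN; rw [hrev, List.idxOf_cons_ne _ (Ne.symm hvx)]
          have hm' : List.idxOf v t.reverse < t.length := by simpa using hm
          simp only [List.length_append, List.length_cons, List.length_nil]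
          omega
        simp [hvx, hlast, ih hvt]

-- step function both programs reduce to
def stepB (s : List Int) (best : List Int) (i : Int) : List Int :=
  let j := (lastDict s).getD (PySem.List.pyGetD s i 0) 0
  if j > i ∧ j - i + 1 > (best.length : Int) then
    PySem.List.slice s (some i) (some (j + 1))
  else best

lemma origin_alt_eq_fold (s : List Int) :
    origin_alt s = (PySem.List.pyRange 0 (PySem.List.len s)).foldl (stepB s) [] := by
  show (PySem.List.enumerate s).foldl _ [] = _
  rw [PySem.List.enumerate_eq_map_pyRange s 0, List.foldl_map]
  rfl

lemma length_slice_span (s : List Int) {i j : Int} (h0 : 0 ≤ i) (hij : i ≤ j)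
    (hj : j < (s.length : Int)) :
    ((PySem.List.slice s (some i) (some (j + 1))).length : Int) = j - i + 1 := by
  rw [PySem.List.slice_toNat s h0 (by omega)]
  simp only [List.length_take, List.length_drop]
  omega

lemma foldl_pick_le (l : List (List Int)) (b : List Int)
    (h : ∀ y ∈ l, y.length ≤ b.length) : l.foldl pickF b = b := by
  induction l with
  | nil => rfl
  | cons y l ih =>
      have hy : ¬ (y.length > b.length) := by
        have := h y (by simp); omega
      simp only [List.foldl_cons, pickF, if_neg hy]
      exact ih fun z hz => h z (by simp [hz])

lemma foldl_pick_head (a h : List Int) (rest : List (List Int))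
    (hr : ∀ y ∈ rest, y.length ≤ h.length) :
    (h :: rest).foldl pickF a = pickF a h := by
  simp only [List.foldl_cons]
  apply foldl_pick_le
  intro y hy
  have := hr y hy
  unfold pickF; split <;> omega

-- slices A's inner loop collects for start index i
def SL (s : List Int) (i : Int) : List (List Int) :=
  ((PySem.List.pyRange (PySem.List.len s - 1) i (-1)).filter
      (fun j => PySem.List.pyGet? s i = PySem.List.pyGet? s j)).map
    (fun j => PySem.List.slice s (some i) (some (j + 1)))

lemma origin_eq_flat (s : List Int) :
    origin s = ((PySem.List.pyRange 0 (PySem.List.len s - 1)).flatMap (SL s)).foldl pickF [] := by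
  show findMax _ = _
  unfold findMax
  congr 1
  have hinner : ∀ (acc : List (List Int)) (i : Int),
      (PySem.List.pyRange (PySem.List.len s - 1) i (-1)).foldl
        (fun origins j =>
          if PySem.List.pyGet? s i = PySem.List.pyGet? s j then
            origins ++ [PySem.List.slice s (some i) (some (j + 1))]
          else origins) acc = acc ++ SL s i := by
    intro acc i
    have := PySem.List.foldl_append_if
      (fun j => decide (PySem.List.pyGet? s i = PySem.List.pyGet? s j))
      (fun j => PySem.List.slice s (some i) (some (j + 1)))
      (PySem.List.pyRange (PySem.List.len s - 1) i (-1)) acc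
    simpa [SL] using this
  calc (PySem.List.pyRange 0 (PySem.List.len s - 1)).foldl _ []
      = (PySem.List.pyRange 0 (PySem.List.len s - 1)).foldl (fun acc i => acc ++ SL s i) [] := by
        apply PySem.List.foldl_congr_mem
        intro acc i _
        exact hinner acc i
    _ = _ := by
        rw [PySem.List.foldl_append_eq_flatMap]
        simp

-- the fold of A's comparison over the slices of one start index equals B's step
lemma SL_fold (s : List Int) (i : Int) (h0 : 0 ≤ i) (hn : i < (s.length : Int)) (a : List Int) :
    (SL s i).foldl pickF a = stepB s a i := by
  have hiN : i.toNat < s.length := by omega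
  have hvmem : s[i.toNat] ∈ s := List.getElem_mem hiN
  set v := s[i.toNat] with hv
  have hgetv : PySem.List.pyGetD s i 0 = v := PySem.List.pyGetD_eq_getElem s 0 h0 hn
  have hJd : (lastDict s).getD (PySem.List.pyGetD s i 0) 0 = ((lastN s v : Nat) : Int) := by
    rw [hgetv]; exact lastDict_getD s v hvmem
  set J : Int := ((lastN s v : Nat) : Int) with hJ
  have hJlt : J < (s.length : Int) := by
    have := lastN_lt hvmem; omega
  have hiJ : i ≤ J := by
    have := le_lastN hvmem hiN rfl
    omega
  have hpJ : ∀ j : Int, J < j → j < (s.length : Int) →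
      ¬ (PySem.List.pyGet? s i = PySem.List.pyGet? s j) := by
    intro j hJj hjn heq
    rw [PySem.List.pyGet?_eq_some_getElem s h0 hn,
        PySem.List.pyGet?_eq_some_getElem s (by omega) hjn] at heq
    have hne : s[j.toNat]'(by omega) ≠ v :=
      getElem_ne_of_lastN_lt hvmem (by omega) (by omega)
    exact hne (Option.some.injEq _ _ ▸ heq).symm
  by_cases hcase : i < J
  · -- there is a later equal element: the first slice collected is the longest
    have hsplit : PySem.List.pyRange (PySem.List.len s - 1) i (-1) =
        ((PySem.List.pyRange (i + 1) J ++ [J]) ++ PySem.List.pyRange (J + 1) (PySem.List.len s)).reverse := by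
      rw [PySem.List.pyRange_neg_one_eq_reverse]
      congr 1
      rw [show PySem.List.len s - 1 + 1 = PySem.List.len s by ring]
      rw [PySem.List.pyRange_one_append (i + 1) (J + 1) (PySem.List.len s) (by omega) (by simp; omega)]
      rw [← PySem.List.pyRange_one_succ_right (by omega)]
    have hfilter :
        (PySem.List.pyRange (PySem.List.len s - 1) i (-1)).filter
          (fun j => PySem.List.pyGet? s i = PySem.List.pyGet? s j) =
        J :: ((PySem.List.pyRange (i + 1) J).filter
          (fun j => PySem.List.pyGet? s i = PySem.List.pyGet? s j)).reverse := by
      rw [hsplit, List.filter_reverse, List.filter_append, List.filter_append]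
      have h1 : (PySem.List.pyRange (J + 1) (PySem.List.len s)).filter
          (fun j => PySem.List.pyGet? s i = PySem.List.pyGet? s j) = [] := by
        rw [List.filter_eq_nil_iff]
        intro j hj
        rw [PySem.List.mem_pyRange_one] at hj
        simp only [decide_eq_true_eq]
        refine hpJ j (by omega) (by simpa using hj.2)
      have h2 : List.filter (fun j => PySem.List.pyGet? s i = PySem.List.pyGet? s j) [J] = [J] := by
        have : PySem.List.pyGet? s i = PySem.List.pyGet? s J := by
          rw [PySem.List.pyGet?_eq_some_getElem s h0 hn,
              PySem.List.pyGet?_eq_some_getElem s (by omega) hJlt]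
          have : s[J.toNat]'(by omega) = v := by
            have := getElem_lastN hvmem
            simpa [hJ] using this
          simp [this, hv]
        simp [this]
      rw [h1, h2]
      simp
    unfold SL
    rw [hfilter]
    simp only [List.map_cons]
    rw [foldl_pick_head]
    · -- pickF a (slice i (J+1)) = stepB s a i
      unfold stepB pickF
      rw [hJd]
      have hlen : ((PySem.List.slice s (some i) (some (J + 1))).length : Int) = J - i + 1 :=
        length_slice_span s h0 hiJ hJlt
      by_cases hgt : J - i + 1 > (a.length : Int)
      · rw [if_pos (show (PySem.List.slice s (some i) (some (J + 1))).length > a.length by omega),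
            if_pos (show J > i ∧ J - i + 1 > (a.length : Int) from ⟨hcase, hgt⟩)]
      · rw [if_neg (show ¬ (PySem.List.slice s (some i) (some (J + 1))).length > a.length by omega),
            if_neg (fun hc => hgt hc.2)]
    · -- every later slice is no longer than the first
      intro y hy
      simp only [List.mem_map, List.mem_reverse, List.mem_filter] at hy
      obtain ⟨j, ⟨hjmem, -⟩, rfl⟩ := hy
      rw [PySem.List.mem_pyRange_one] at hjmem
      have hy1 : ((PySem.List.slice s (some i) (some (j + 1))).length : Int) = j - i + 1 :=
        length_slice_span s h0 (by omega) (by omega)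
      have hy2 : ((PySem.List.slice s (some i) (some (J + 1))).length : Int) = J - i + 1 :=
        length_slice_span s h0 hiJ hJlt
      omega
  · -- no later equal element: nothing is collected and B's guard fails
    have hJeq : J = i := le_antisymm (by omega) hiJ
    have hnil : SL s i = [] := by
      unfold SL
      rw [List.filter_eq_nil_iff.2, List.map_nil]
      intro j hj
      rw [PySem.List.mem_pyRange_neg_one] at hj
      simp only [decide_eq_true_eq]
      exact hpJ j (by omega) (by have := hj.2; simp at this ⊢; omega)
    rw [hnil]
    unfold stepB
    rw [hJd, if_neg (by omega)]
    rfl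

-- ===== VERDICT (by name: the statement is the Claim_ definition above) =====
theorem origin_spec : Claim_equal_origin := by
  intro s _
  show origin s = origin_alt s
  rw [origin_eq_flat, origin_alt_eq_fold, List.foldl_flatMap]
  have hstep : (PySem.List.pyRange 0 (PySem.List.len s - 1)).foldl
      (fun acc i => (SL s i).foldl pickF acc) [] =
      (PySem.List.pyRange 0 (PySem.List.len s - 1)).foldl (stepB s) [] := by
    apply PySem.List.foldl_congr_mem
    intro acc i hi
    rw [PySem.List.mem_pyRange_one] at hi
    exact SL_fold s i hi.1 (by have := hi.2; simp at this; omega) acc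
  rw [hstep]
  by_cases hs : s = []
  · subst hs; rfl
  · have hpos : 0 < s.length := List.length_pos_iff.2 hs
    have hl : PySem.List.len s = (s.length : Int) := by simp
    have hext : PySem.List.pyRange 0 (PySem.List.len s) =
        PySem.List.pyRange 0 (PySem.List.len s - 1) ++ [PySem.List.len s - 1] := by
      have h := PySem.List.pyRange_one_succ_right (a := 0) (b := PySem.List.len s - 1) (by omega)
      rw [show PySem.List.len s - 1 + 1 = PySem.List.len s by ring] at h
      exact h
    rw [hext, List.foldl_append]
    set b := (PySem.List.pyRange 0 (PySem.List.len s - 1)).foldl (stepB s) []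
    -- the extra last index contributes nothing: its last occurrence is itself
    show b = stepB s b (PySem.List.len s - 1)
    set i : Int := PySem.List.len s - 1 with hi
    have h0 : 0 ≤ i := by omega
    have hn : i < (s.length : Int) := by omega
    have hiN : i.toNat < s.length := by omega
    have hvmem : s[i.toNat] ∈ s := List.getElem_mem hiN
    unfold stepB
    rw [PySem.List.pyGetD_eq_getElem s 0 h0 hn, lastDict_getD s _ hvmem]
    have hle : lastN s (s[i.toNat]) < s.length := lastN_lt hvmem
    rw [if_neg (by rintro ⟨h1, -⟩; omega)]
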